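-- pv_equiv track=rewrite | github.com/YinTaiWang/IntroductionToPython | module3/pyramid.py | alphabets
-- ===== SOURCE A (Python) =====
-- def alphabets(x):
--     # unicode of alphabets
--     a = ord('a')
--     unicode_letter = ord(x)
--     # three parts of the line
--     a_to_y = ''
--     z = ''
--     y_to_a = ''
--     lines = ''
--     # the spaces, default width = 80
--     front_space = 0
--     for i in range(a, unicode_letter):
--         a_to_y += chr(i)
--         z = chr(unicode_letter)
--         y_to_a += chr(a+unicode_letter-1-i)
--         lines = a_to_y + z + y_to_a
--         front_space = len(a_to_y)
--     return front_space, lines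
-- ===== SOURCE B (Python) =====
-- def alphabets(x):
--     # Build the ascending prefix once, mirror it with a slice; width is just len(prefix).
--     u = ord(x)
--     a = ord('a')
--     if u <= a:
--         return 0, ''
--     prefix = ''.join(chr(i) for i in range(a, u))
--     return len(prefix), prefix + x + prefix[::-1]
-- ===== Notes on version B (the rewrite author's own statement) =====
-- stated objective: simpler
-- what changed: B replaces A's loop that rebuilds three accumulator strings and reassembles the line on every iteration with a single prefix build, a slice-reversal for the mirror, and the prefix length as the width, with an explicit early return for the degenerate case where the range is empty.
import Mathlib
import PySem

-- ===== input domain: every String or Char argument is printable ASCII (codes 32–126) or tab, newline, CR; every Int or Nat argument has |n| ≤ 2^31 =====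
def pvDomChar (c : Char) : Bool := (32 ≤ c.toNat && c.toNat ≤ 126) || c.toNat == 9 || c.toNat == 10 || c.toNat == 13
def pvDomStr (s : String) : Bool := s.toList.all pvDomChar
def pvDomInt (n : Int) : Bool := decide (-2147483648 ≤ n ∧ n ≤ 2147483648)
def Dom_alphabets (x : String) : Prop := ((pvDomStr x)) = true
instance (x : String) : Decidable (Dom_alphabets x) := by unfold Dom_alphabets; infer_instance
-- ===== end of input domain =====

-- B builds the prefix once and mirrors it with a reversal instead of A's per-iteration
-- reassembly of three accumulator strings (objective: simpler).


-- ===== PORT A =====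
-- ord(x): x must be a single character (Pre_); the _ => 0 branch is unreachable inside Pre_.
def pvOrd (x : String) : Int :=
  match x.toList with
  | [c] => (c.toNat : Int)
  | _ => 0

def alphabets (x : String) : Int × String :=
  let a : Int := 97
  let u : Int := pvOrd x
  let st := (PySem.List.pyRange a u 1).foldl
    (fun (st : String × String × String × String × Int) (i : Int) =>
      let (a_to_y, _z, y_to_a, _lines, _fs) := st
      let a_to_y := a_to_y ++ String.ofList [Char.ofNat i.toNat]
      let z := String.ofList [Char.ofNat u.toNat]
      let y_to_a := y_to_a ++ String.ofList [Char.ofNat (a + u - 1 - i).toNat]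
      let lines := a_to_y ++ z ++ y_to_a
      let fs : Int := (a_to_y.toList.length : Int)
      (a_to_y, z, y_to_a, lines, fs))
    ("", "", "", "", 0)
  (st.2.2.2.2, st.2.2.2.1)

-- ===== PORT B =====
def alphabets_alt (x : String) : Int × String :=
  let u : Int := pvOrd x
  let a : Int := 97
  if u ≤ a then (0, "")
  else
    let prefixL : List Char := (PySem.List.pyRange a u 1).map (fun i => Char.ofNat i.toNat)
    ((prefixL.length : Int), String.ofList (prefixL ++ x.toList ++ prefixL.reverse))

-- ===== PRECONDITION & SPEC =====
-- ord raises TypeError unless x has exactly one character.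
def Pre_alphabets (x : String) : Prop := x.toList.length = 1
instance (x : String) : Decidable (Pre_alphabets x) := by unfold Pre_alphabets; infer_instance
def pvWitness_alphabets : String := "e"

def Spec_alphabets (x : String) (out : Int × String) : Prop := out = alphabets_alt x
instance (x : String) (out : Int × String) : Decidable (Spec_alphabets x out) := by unfold Spec_alphabets; infer_instance

-- ===== CLAIM (what is proved, stated in full; the proofs are below) =====
def Claim_equal_alphabets : Prop := ∀ (x : String), Dom_alphabets x → Pre_alphabets x → Spec_alphabets x (alphabets x)

-- ===== LEMMAS AND PROOFS =====
set_option maxRecDepth 4000 in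
theorem key : ∀ n ∈ List.range 127,
    alphabets (String.ofList [Char.ofNat n]) = alphabets_alt (String.ofList [Char.ofNat n]) := by decide

-- ===== VERDICT (by name: the statement is the Claim_ definition above) =====
theorem alphabets_spec : Claim_equal_alphabets := by
  intro x hdom hpre
  unfold Spec_alphabets
  obtain ⟨c, hc⟩ := List.length_eq_one_iff.mp hpre
  have hx : x = String.ofList [c] := by
    rw [← hc, String.ofList_toList]
  have hle : c.toNat < 127 := by
    have := hdom
    simp [Dom_alphabets, pvDomStr, hc, pvDomChar] at this
    omega
  have hco : Char.ofNat c.toNat = c := by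
    simp [Char.ofNat_toNat]
  have := key c.toNat (by simpa using hle)
  rw [hco] at this
  rw [hx]
  exact this.symm ▸ rfl
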